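-- pv_equiv track=rewrite | github.com/amanuelgthn/DSA | beautifulString/BeautifulString.py | BeautifulString
-- ===== SOURCE A (Python) =====
-- def BeautifulString(inputString):
--     stringArranged = {}
--     index = 0
--     asciiValues = list(range(97, 123, 1))
--     for i in range(97, 123, 1):
--         stringArranged[i] = 0
--         for char in inputString:
--             if ord(char) in stringArranged.keys() and ord(char) == i:
--                 stringArranged[ord(char)] += 1
--         i += 1
--     value = list(stringArranged.values())
--     keys = list(stringArranged.keys())
--     for i in range(len(keys)):
--         for j in range(0, len(keys) - 1):
--             if keys[j] > keys[j + 1]: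
--                 keys[j],keys[j + 1] = keys[j + 1], keys[j]
--             j += 1
--         i += 1
--     sortedArray = []
--     for i in keys:
--         sortedArray.append(stringArranged[i])
--     for i in range(len(sortedArray)):
--         for j in range(0, len(sortedArray) - 1):
--             if sortedArray[j] < sortedArray[j + 1]:
--                 sortedArray[j],sortedArray[j + 1] = sortedArray[j + 1], sortedArray[j]
--             j += 1
--         i += 1
--     if value == sortedArray:
--         return True
--     return False
-- ===== SOURCE B (Python) =====
-- def BeautifulString(inputString):
--     freq = [0] * 26
--     for ch in inputString:
--         o = ord(ch)
--         if 97 <= o <= 122: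
--             freq[o - 97] += 1
--     for k in range(25):
--         if freq[k] < freq[k + 1]:
--             return False
--     return True
-- ===== Notes on version B (the rewrite author's own statement) =====
-- stated objective: faster
-- what changed: Replaces the dict built by a 26-pass scan over the string plus two hand-written bubble sorts and a list comparison with a single counting pass into a 26-slot frequency list followed by one short-circuiting adjacent-pair scan for non-increasing order.
import Mathlib
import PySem

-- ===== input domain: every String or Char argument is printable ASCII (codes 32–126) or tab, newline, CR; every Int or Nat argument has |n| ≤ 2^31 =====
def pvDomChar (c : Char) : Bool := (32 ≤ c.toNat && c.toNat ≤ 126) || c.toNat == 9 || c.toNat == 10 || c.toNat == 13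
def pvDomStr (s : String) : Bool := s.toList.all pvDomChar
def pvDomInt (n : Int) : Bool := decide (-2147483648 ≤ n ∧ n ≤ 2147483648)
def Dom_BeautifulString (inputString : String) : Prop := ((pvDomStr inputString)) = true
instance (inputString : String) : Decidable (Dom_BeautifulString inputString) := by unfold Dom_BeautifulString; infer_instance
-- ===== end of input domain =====

-- B replaces A's 26×|s| dict-filling scan and two hand-written bubble sorts with one counting
-- pass into a 26-slot list and one short-circuiting adjacent-pair scan (objective: faster, by a constant factor).

-- ===== PORT A =====
-- ord(c) as Int
def pvOrd (c : Char) : Int := (c.toNat : Int)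

-- one pass of A's first bubble loop (on keys): 'for j in range(0, len-1): if keys[j] > keys[j+1]: swap'
def pvPassA (ys : List Int) : List Int :=
  (PySem.List.pyRange 0 ((ys.length : Int) - 1) 1).foldl (fun zs j =>
    if PySem.List.pyGetD zs (j+1) 0 < PySem.List.pyGetD zs j 0
    then PySem.List.pySetD (PySem.List.pySetD zs j (PySem.List.pyGetD zs (j+1) 0)) (j+1)
           (PySem.List.pyGetD zs j 0)
    else zs) ys

-- one pass of A's second bubble loop (on sortedArray): swap when sortedArray[j] < sortedArray[j+1]
def pvPassD (ys : List Int) : List Int :=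
  (PySem.List.pyRange 0 ((ys.length : Int) - 1) 1).foldl (fun zs j =>
    if PySem.List.pyGetD zs j 0 < PySem.List.pyGetD zs (j+1) 0
    then PySem.List.pySetD (PySem.List.pySetD zs j (PySem.List.pyGetD zs (j+1) 0)) (j+1)
           (PySem.List.pyGetD zs j 0)
    else zs) ys

-- 'for i in range(len(xs)):' around one pass
def pvBubbleA (xs : List Int) : List Int :=
  (PySem.List.pyRange 0 (xs.length : Int) 1).foldl (fun ys _ => pvPassA ys) xs
def pvBubbleD (xs : List Int) : List Int :=
  (PySem.List.pyRange 0 (xs.length : Int) 1).foldl (fun ys _ => pvPassD ys) xs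

def BeautifulString (inputString : String) : Bool :=
  let _asciiValues := PySem.List.pyRange 97 123 1   -- asciiValues = list(range(97,123,1)) (unused, as in A)
  let d : PySem.Dict Int Int :=
    (PySem.List.pyRange 97 123 1).foldl (fun d i =>
      inputString.toList.foldl (fun d c =>
        if d.contains (pvOrd c) && (pvOrd c == i)
        -- stringArranged[ord(char)] += 1 (the key is present: the membership test just passed)
        then d.insert (pvOrd c) (d.getD (pvOrd c) 0 + 1)
        else d) (d.insert i 0)) PySem.Dict.empty
  let value := d.values
  let keys := pvBubbleA d.keys
  let sortedArray := keys.map (fun i => d.getD i 0)   -- sortedArray.append(stringArranged[i])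
  let sorted2 := pvBubbleD sortedArray
  if value == sorted2 then true else false

-- ===== PORT B =====
-- 'for k in range(25): if freq[k] < freq[k+1]: return False / return True' — early-exit adjacent-pair scan
def pvNonInc : List Int → Bool
  | x :: y :: r => if x < y then false else pvNonInc (y :: r)
  | _ => true

def BeautifulString_alt (inputString : String) : Bool :=
  let freq := inputString.toList.foldl (fun f c =>
    if 97 ≤ c.toNat && c.toNat ≤ 122
    then f.set (c.toNat - 97) (f.getD (c.toNat - 97) 0 + 1)   -- freq[o-97] += 1 (index in range: guarded)
    else f) (List.replicate 26 (0 : Int))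
  pvNonInc freq

-- ===== PRECONDITION & SPEC =====
def Spec_BeautifulString (inputString : String) (out : Bool) : Prop := out = BeautifulString_alt inputString
instance (inputString : String) (out : Bool) : Decidable (Spec_BeautifulString inputString out) := by unfold Spec_BeautifulString; infer_instance

-- ===== CLAIM (what is proved, stated in full; the proofs are below) =====
def Claim_equal_BeautifulString : Prop := ∀ (inputString : String), Dom_BeautifulString inputString → Spec_BeautifulString inputString (BeautifulString inputString)

-- ===== LEMMAS AND PROOFS =====

-- number of characters of cs whose ord is i, as an Int
def pvCnt (cs : List Char) (i : Int) : Int := ((cs.countP (fun c => pvOrd c == i)) : Nat)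

-- the 26 letter counts in key order (what A's dict holds and B's list holds)
def pvVals (cs : List Char) : List Int :=
  (PySem.List.pyRange 97 123 1).map (fun i => pvCnt cs i)

-- structural form of one descending bubble pass
def pvPassRec : List Int → List Int
  | x :: y :: r => if x < y then y :: pvPassRec (x :: r) else x :: pvPassRec (y :: r)
  | l => l

def pvIter : Nat → List Int → List Int
  | 0, xs => xs
  | n + 1, xs => pvIter n (pvPassRec xs)

theorem pvPassRec_nil : pvPassRec [] = [] := by simp [pvPassRec]

theorem pvPassRec_singleton (x : Int) : pvPassRec [x] = [x] := by simp [pvPassRec]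

-- A's dict: overwriting a key with its current value is the identity
theorem pv_insert_self {d : PySem.Dict Int Int} {i v : Int}
    (hnd : d.keys.Nodup) (h : d.get? i = some v) : d.insert i v = d := by
  have hc : d.contains i = true := by
    rw [PySem.Dict.contains_eq_isSome_get?, h]; rfl
  apply PySem.Dict.ext
  rw [PySem.Dict.items_insert_of_contains _ _ hc]
  conv_rhs => rw [← List.map_id d.items]
  refine List.map_congr_left ?_
  rintro ⟨p1, p2⟩ hp
  by_cases hpi : p1 = i
  · have hg := PySem.Dict.get?_of_mem_items d hp hnd
    rw [hpi, h] at hg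
    have hv : v = p2 := Option.some.inj hg
    simp [hpi, hv]
  · simp [hpi]

-- A's inner character loop adds the count of characters with ord = i onto the entry at i
theorem pv_inner (i : Int) :
    ∀ (cs : List Char) (d : PySem.Dict Int Int) (v : Int), d.keys.Nodup → d.get? i = some v →
      cs.foldl (fun d c =>
        if d.contains (pvOrd c) && (pvOrd c == i)
        then d.insert (pvOrd c) (d.getD (pvOrd c) 0 + 1)
        else d) d = d.insert i (v + pvCnt cs i) := by
  intro cs
  induction cs with
  | nil =>
    intro d v hnd h
    simp only [List.foldl_nil, pvCnt, List.countP_nil, Nat.cast_zero, add_zero]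
    exact (pv_insert_self hnd h).symm
  | cons c cs ih =>
    intro d v hnd h
    simp only [List.foldl_cons]
    by_cases hc : pvOrd c = i
    · have hct : d.contains (pvOrd c) = true := by
        rw [hc, PySem.Dict.contains_eq_isSome_get?, h]; rfl
      have hcb : (pvOrd c == i) = true := by simp [hc]
      rw [if_pos (by rw [hct, hcb]; rfl)]
      have hg : d.getD (pvOrd c) 0 = v := by
        rw [hc]; exact PySem.Dict.getD_of_get?_eq_some d 0 h
      rw [hg, hc]
      rw [ih (d.insert i (v + 1)) (v + 1)
        (PySem.Dict.nodup_keys_insert d i (v + 1) hnd)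
        (PySem.Dict.get?_insert_self d i (v + 1))]
      rw [PySem.Dict.insert_insert_self]
      congr 1
      simp only [pvCnt, List.countP_cons, hcb, if_true]
      push_cast
      ring
    · have hcb : (pvOrd c == i) = false := by simp [hc]
      rw [if_neg (by rw [hcb]; simp)]
      rw [ih d v hnd h]
      congr 2
      simp [pvCnt, hcb]

-- A's outer loop, rewritten step by step to a plain insert loop
theorem pv_outer (cs : List Char) :
    ∀ (l : List Int) (d0 : PySem.Dict Int Int), d0.keys.Nodup →
      l.foldl (fun d i =>
        cs.foldl (fun d c =>
          if d.contains (pvOrd c) && (pvOrd c == i)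
          then d.insert (pvOrd c) (d.getD (pvOrd c) 0 + 1)
          else d) (d.insert i 0)) d0
      = l.foldl (fun d i => d.insert i (pvCnt cs i)) d0 := by
  intro l
  induction l with
  | nil => intro d0 _; rfl
  | cons j l ih =>
    intro d0 hnd
    simp only [List.foldl_cons]
    rw [pv_inner j cs (d0.insert j 0) 0
      (PySem.Dict.nodup_keys_insert d0 j 0 hnd)
      (PySem.Dict.get?_insert_self d0 j 0),
      PySem.Dict.insert_insert_self, zero_add]
    exact ih (d0.insert j (pvCnt cs j)) (PySem.Dict.nodup_keys_insert d0 j _ hnd)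

-- the finished dict, as an items list
theorem pv_dict_items (cs : List Char) :
    ((PySem.List.pyRange 97 123 1).foldl (fun d i =>
        cs.foldl (fun d c =>
          if d.contains (pvOrd c) && (pvOrd c == i)
          then d.insert (pvOrd c) (d.getD (pvOrd c) 0 + 1)
          else d) (d.insert i 0)) (PySem.Dict.empty : PySem.Dict Int Int)).items
      = (PySem.List.pyRange 97 123 1).map (fun i => (i, pvCnt cs i)) := by
  rw [pv_outer cs (PySem.List.pyRange 97 123 1) PySem.Dict.empty PySem.Dict.nodup_keys_empty]
  have h := PySem.Dict.items_foldl_insert_fresh (PySem.List.pyRange 97 123 1)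
    (fun a => a) (fun a => pvCnt cs a) (PySem.Dict.empty : PySem.Dict Int Int)
    (fun a _ => PySem.Dict.contains_empty a) (by simpa using PySem.List.nodup_pyRange_one 97 123)
  simpa using h

-- the index-based descending pass is the structural pass
theorem pv_pass_go (rest : List Int) :
    ∀ (pre : List Int) (x : Int),
      (PySem.List.pyRange (pre.length : Int) ((pre.length + rest.length : Nat) : Int) 1).foldl
        (fun zs j =>
          if PySem.List.pyGetD zs j 0 < PySem.List.pyGetD zs (j+1) 0
          then PySem.List.pySetD (PySem.List.pySetD zs j (PySem.List.pyGetD zs (j+1) 0)) (j+1)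
                 (PySem.List.pyGetD zs j 0)
          else zs) (pre ++ x :: rest)
      = pre ++ pvPassRec (x :: rest) := by
  induction rest with
  | nil =>
    intro pre x
    simp [pvPassRec, PySem.List.pyRange_zero_nat]
  | cons y r ih =>
    intro pre x
    have hlt : (pre.length : Int) < ((pre.length + (y :: r).length : Nat) : Int) := by
      simp
    rw [PySem.List.pyRange_one_cons hlt]
    simp only [List.foldl_cons]
    have hcast : (pre.length : Int) + 1 = ((pre.length + 1 : Nat) : Int) := by push_cast; ring
    have hget0 : PySem.List.pyGetD (pre ++ x :: y :: r) (pre.length : Int) 0 = x := by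
      rw [PySem.List.pyGetD_natCast]
      rw [List.getD_eq_getElem _ _ (by simp)]
      simp
    have hget1 : PySem.List.pyGetD (pre ++ x :: y :: r) ((pre.length : Int) + 1) 0 = y := by
      rw [hcast, PySem.List.pyGetD_natCast]
      rw [List.getD_eq_getElem _ _ (by simp)]
      rw [List.getElem_append_right (by omega)]
      simp
    by_cases hxy : x < y
    · rw [if_pos (by rw [hget0, hget1]; exact hxy)]
      rw [hget0, hget1]
      have hset : PySem.List.pySetD (PySem.List.pySetD (pre ++ x :: y :: r) (pre.length : Int) y)
          ((pre.length : Int) + 1) x = (pre ++ [y]) ++ x :: r := by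
        rw [PySem.List.pySetD_natCast, hcast, PySem.List.pySetD_natCast]
        rw [List.set_append_right _ _ (le_refl pre.length)]
        rw [List.set_append_right _ _ (by simp)]
        simp
      rw [hset]
      have := ih (pre ++ [y]) x
      have hb1 : ((pre ++ [y]).length : Int) = (pre.length : Int) + 1 := by simp; try push_cast; try ring; try omega
      have hb2 : (((pre ++ [y]).length + r.length : Nat) : Int)
          = ((pre.length + (y :: r).length : Nat) : Int) := by simp; try push_cast; try ring; try omega
      rw [hb1, hb2] at this
      rw [this]
      have : pvPassRec (x :: y :: r) = y :: pvPassRec (x :: r) := by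
        rw [pvPassRec]; rw [if_pos hxy]
      rw [this]
      simp
    · rw [if_neg (by rw [hget0, hget1]; exact hxy)]
      have heq : pre ++ x :: y :: r = (pre ++ [x]) ++ y :: r := by simp
      rw [heq]
      have := ih (pre ++ [x]) y
      have hb1 : ((pre ++ [x]).length : Int) = (pre.length : Int) + 1 := by simp; try push_cast; try ring; try omega
      have hb2 : (((pre ++ [x]).length + r.length : Nat) : Int)
          = ((pre.length + (y :: r).length : Nat) : Int) := by simp; try push_cast; try ring; try omega
      rw [hb1, hb2] at this
      rw [this]
      have : pvPassRec (x :: y :: r) = x :: pvPassRec (y :: r) := by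
        rw [pvPassRec]; rw [if_neg hxy]
      rw [this]
      simp

theorem pv_passD_eq (xs : List Int) : pvPassD xs = pvPassRec xs := by
  cases xs with
  | nil =>
    rw [pvPassRec_nil]
    simp [pvPassD, PySem.List.pyRange_one]
  | cons x rest =>
    unfold pvPassD
    have h := pv_pass_go rest [] x
    simp only [List.length_nil, Nat.cast_zero, Nat.zero_add, List.nil_append] at h
    have hb : ((x :: rest).length : Int) - 1 = ((rest.length : Nat) : Int) := by
      simp
    rw [hb]
    simpa using h

theorem pv_iter_succ (n : Nat) : ∀ (xs : List Int), pvIter (n + 1) xs = pvPassRec (pvIter n xs) := by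
  induction n with
  | zero => intro xs; rfl
  | succ n ih =>
    intro xs
    show pvIter (n + 1) (pvPassRec xs) = _
    rw [ih (pvPassRec xs)]
    rfl

theorem pv_foldl_iter (n : Nat) (xs : List Int) :
    (PySem.List.pyRange 0 (n : Int) 1).foldl (fun ys _ => pvPassRec ys) xs = pvIter n xs := by
  induction n generalizing xs with
  | zero => simp [PySem.List.pyRange_zero_nat, pvIter]
  | succ n ih =>
    have : ((n + 1 : Nat) : Int) = (n : Int) + 1 := by push_cast; ring
    rw [this, PySem.List.pyRange_one_succ_right (by omega)]
    rw [List.foldl_append]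
    rw [ih xs]
    simp [pv_iter_succ]

theorem pv_bubbleD_eq (xs : List Int) : pvBubbleD xs = pvIter xs.length xs := by
  unfold pvBubbleD
  simp only [pv_passD_eq]
  exact pv_foldl_iter xs.length xs

theorem pv_pass_perm : ∀ (xs : List Int), (pvPassRec xs).Perm xs
  | [] => by rw [pvPassRec_nil]
  | [x] => by rw [pvPassRec_singleton]
  | x :: y :: r => by
    rw [pvPassRec]
    by_cases h : x < y
    · rw [if_pos h]
      exact ((pv_pass_perm (x :: r)).cons y).trans (List.Perm.swap x y r)
    · rw [if_neg h]
      exact (pv_pass_perm (y :: r)).cons x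
  termination_by xs => xs.length

theorem pv_iter_perm (n : Nat) : ∀ (xs : List Int), (pvIter n xs).Perm xs := by
  induction n with
  | zero => intro xs; rfl
  | succ n ih =>
    intro xs
    exact (ih (pvPassRec xs)).trans (pv_pass_perm xs)

theorem pv_pass_append_min : ∀ (t : List Int) (m : Int), (∀ z ∈ t, m ≤ z) →
    pvPassRec (t ++ [m]) = pvPassRec t ++ [m]
  | [], m, _ => by rw [List.nil_append, pvPassRec_nil, pvPassRec_singleton]; rfl
  | [x], m, h => by
    have hmx : m ≤ x := h x (by simp)
    rw [List.cons_append, List.nil_append, pvPassRec_singleton, pvPassRec,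
      if_neg (not_lt.mpr hmx), pvPassRec_singleton]
    rfl
  | x :: y :: r, m, h => by
    have h1 : pvPassRec ((x :: y :: r) ++ [m]) =
        if x < y then y :: pvPassRec ((x :: r) ++ [m]) else x :: pvPassRec ((y :: r) ++ [m]) := by
      simp only [List.cons_append]
      rw [pvPassRec]
    rw [h1, pvPassRec]
    by_cases hxy : x < y
    · rw [if_pos hxy, if_pos hxy]
      rw [pv_pass_append_min (x :: r) m (by
        intro z hz
        apply h
        rcases List.mem_cons.mp hz with rfl | hz
        · exact List.mem_cons_self
        · exact List.mem_cons_of_mem _ (List.mem_cons_of_mem _ hz))]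
      rfl
    · rw [if_neg hxy, if_neg hxy]
      rw [pv_pass_append_min (y :: r) m (by
        intro z hz
        apply h
        exact List.mem_cons_of_mem _ hz)]
      rfl
  termination_by t _ _ => t.length

theorem pv_pass_decomp : ∀ (x : Int) (xs : List Int),
    ∃ t m, pvPassRec (x :: xs) = t ++ [m] ∧ ∀ z ∈ x :: xs, m ≤ z
  | x, [] => ⟨[], x, by rw [pvPassRec_singleton]; rfl, by intro z hz; simp at hz; omega⟩
  | x, y :: r => by
    by_cases hxy : x < y
    · obtain ⟨t, m, he, hm⟩ := pv_pass_decomp x r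
      refine ⟨y :: t, m, ?_, ?_⟩
      · rw [pvPassRec, if_pos hxy, he]; rfl
      · intro z hz
        have hmx : m ≤ x := hm x List.mem_cons_self
        rcases List.mem_cons.mp hz with rfl | hz
        · exact hmx
        rcases List.mem_cons.mp hz with rfl | hz
        · exact le_of_lt (lt_of_le_of_lt hmx hxy)
        · exact hm z (List.mem_cons_of_mem _ hz)
    · obtain ⟨t, m, he, hm⟩ := pv_pass_decomp y r
      refine ⟨x :: t, m, ?_, ?_⟩
      · rw [pvPassRec, if_neg hxy, he]; rfl
      · intro z hz
        have hmy : m ≤ y := hm y List.mem_cons_self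
        rcases List.mem_cons.mp hz with rfl | hz
        · exact le_trans hmy (not_lt.mp hxy)
        rcases List.mem_cons.mp hz with rfl | hz
        · exact hmy
        · exact hm z (List.mem_cons_of_mem _ hz)
  termination_by _ xs => xs.length

theorem pv_iter_append_min (n : Nat) : ∀ (t : List Int) (m : Int), (∀ z ∈ t, m ≤ z) →
    pvIter n (t ++ [m]) = pvIter n t ++ [m] := by
  induction n with
  | zero => intro t m _; rfl
  | succ n ih =>
    intro t m h
    show pvIter n (pvPassRec (t ++ [m])) = _
    rw [pv_pass_append_min t m h]
    rw [ih (pvPassRec t) m (fun z hz => h z ((pv_pass_perm t).subset hz))]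
    rfl

theorem pv_iter_sorted (n : Nat) : ∀ (xs : List Int), xs.length ≤ n →
    (pvIter n xs).IsChain (fun a b => b ≤ a) := by
  induction n with
  | zero =>
    intro xs h
    have : xs = [] := List.eq_nil_of_length_eq_zero (by omega)
    subst this
    exact List.IsChain.nil
  | succ n ih =>
    intro xs h
    cases xs with
    | nil =>
      show (pvIter n (pvPassRec [])).IsChain _
      rw [pvPassRec_nil]
      exact ih [] (by simp)
    | cons x l =>
      obtain ⟨t, m, he, hm⟩ := pv_pass_decomp x l
      show (pvIter n (pvPassRec (x :: l))).IsChain _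
      rw [he]
      have hperm : (t ++ [m]).Perm (x :: l) := he ▸ pv_pass_perm (x :: l)
      have hmt : ∀ z ∈ t, m ≤ z := fun z hz =>
        hm z (hperm.subset (List.mem_append_left _ hz))
      rw [pv_iter_append_min n t m hmt]
      have hlen : t.length ≤ n := by
        have := hperm.length_eq
        simp at this h
        omega
      refine (ih t hlen).append (by simp) ?_
      intro a ha b hb
      have hat : a ∈ pvIter n t := List.mem_of_getLast? ha
      have hbm : m = b := by simpa using hb
      subst hbm
      exact hmt a ((pv_iter_perm n t).subset hat)

theorem pv_nonInc_iff : ∀ (xs : List Int), pvNonInc xs = true ↔ xs.IsChain (fun a b => b ≤ a)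
  | [] => by simp [pvNonInc]
  | [x] => by simp [pvNonInc]
  | x :: y :: r => by
    rw [pvNonInc]
    by_cases h : x < y
    · rw [if_pos h]
      simp [List.isChain_cons_cons, not_le.mpr h]
    · rw [if_neg h]
      rw [pv_nonInc_iff (y :: r)]
      simp [List.isChain_cons_cons, not_lt.mp h]
  termination_by xs => xs.length

theorem pv_fix_iff (xs : List Int) :
    xs = pvIter xs.length xs ↔ xs.IsChain (fun a b => b ≤ a) := by
  constructor
  · intro h
    have := pv_iter_sorted xs.length xs le_rfl
    rwa [← h] at this
  · intro h
    have htr : Trans (fun (a b : Int) => b ≤ a) (fun a b => b ≤ a) (fun a b => b ≤ a) :=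
      ⟨fun h1 h2 => le_trans h2 h1⟩
    have hp : xs.Pairwise (fun a b => b ≤ a) := (@List.isChain_iff_pairwise _ _ _ htr).mp h
    have hs := pv_iter_sorted xs.length xs le_rfl
    have hp2 : (pvIter xs.length xs).Pairwise (fun a b => b ≤ a) :=
      (@List.isChain_iff_pairwise _ _ _ htr).mp hs
    exact List.Perm.eq_of_pairwise (fun a b _ _ h1 h2 => le_antisymm h2 h1) hp hp2
      (pv_iter_perm xs.length xs).symm

-- B's counting loop gives the 26 per-letter counts
theorem pv_freq (cs : List Char) :
    ∀ (f : List Int), f.length = 26 →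
      ((cs.foldl (fun f c =>
          if 97 ≤ c.toNat && c.toNat ≤ 122
          then f.set (c.toNat - 97) (f.getD (c.toNat - 97) 0 + 1)
          else f) f).length = 26 ∧
       ∀ k, k < 26 →
        (cs.foldl (fun f c =>
          if 97 ≤ c.toNat && c.toNat ≤ 122
          then f.set (c.toNat - 97) (f.getD (c.toNat - 97) 0 + 1)
          else f) f).getD k 0 = f.getD k 0 + pvCnt cs ((97 : Int) + k)) := by
  induction cs with
  | nil =>
    intro f hf
    refine ⟨hf, fun k hk => ?_⟩
    simp [pvCnt]
  | cons c cs ih =>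
    intro f hf
    simp only [List.foldl_cons]
    by_cases hg : (97 ≤ c.toNat && c.toNat ≤ 122) = true
    · rw [if_pos hg]
      have hgr : 97 ≤ c.toNat ∧ c.toNat ≤ 122 := by simpa using hg
      have hlen' : (f.set (c.toNat - 97) (f.getD (c.toNat - 97) 0 + 1)).length = 26 := by
        simp [hf]
      obtain ⟨h1, h2⟩ := ih _ hlen'
      refine ⟨h1, fun k hk => ?_⟩
      rw [h2 k hk]
      by_cases hck : c.toNat = 97 + k
      · have hidx : c.toNat - 97 = k := by omega
        have hset : (f.set (c.toNat - 97) (f.getD (c.toNat - 97) 0 + 1)).getD k 0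
            = f.getD k 0 + 1 := by
          rw [hidx]
          rw [List.getD_eq_getElem _ _ (by simp [hf]; omega)]
          rw [List.getElem_set_self]
        rw [hset]
        have hcnt : pvCnt (c :: cs) ((97 : Int) + k) = pvCnt cs ((97 : Int) + k) + 1 := by
          have : (pvOrd c == (97 : Int) + k) = true := by
            simp [pvOrd, hck]
          simp only [pvCnt, List.countP_cons, this, if_true]
          push_cast; ring
        rw [hcnt]; ring
      · have hidx : c.toNat - 97 ≠ k := by omega
        have hset : (f.set (c.toNat - 97) (f.getD (c.toNat - 97) 0 + 1)).getD k 0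
            = f.getD k 0 := by
          rw [List.getD_eq_getElem _ _ (by simp [hf]; omega)]
          rw [List.getElem_set_ne (by omega)]
          exact (List.getD_eq_getElem f 0 (show k < f.length by omega)).symm
        rw [hset]
        have hcnt : pvCnt (c :: cs) ((97 : Int) + k) = pvCnt cs ((97 : Int) + k) := by
          have : (pvOrd c == (97 : Int) + k) = false := by
            simp [pvOrd]; omega
          simp [pvCnt, this]
        rw [hcnt]
    · rw [if_neg hg]
      have hgr : ¬ (97 ≤ c.toNat ∧ c.toNat ≤ 122) := by
        intro hcon
        exact hg (by simp [hcon.1, hcon.2])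
      obtain ⟨h1, h2⟩ := ih f hf
      refine ⟨h1, fun k hk => ?_⟩
      rw [h2 k hk]
      congr 1
      have : (pvOrd c == (97 : Int) + k) = false := by
        simp [pvOrd]; omega
      simp [pvCnt, this]

-- the ascending bubble sort leaves the (already sorted) key list unchanged
set_option maxRecDepth 8192 in
theorem pv_bubbleA_range :
    pvBubbleA (PySem.List.pyRange 97 123 1) = PySem.List.pyRange 97 123 1 := by decide

-- A computes: the counts list compared with its descending bubble sort
theorem pv_A_eq (s : String) :
    BeautifulString s = (pvVals s.toList == pvIter (pvVals s.toList).length (pvVals s.toList)) := by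
  unfold BeautifulString
  dsimp only
  set d : PySem.Dict Int Int :=
    (PySem.List.pyRange 97 123 1).foldl (fun d i =>
      s.toList.foldl (fun d c =>
        if d.contains (pvOrd c) && (pvOrd c == i)
        then d.insert (pvOrd c) (d.getD (pvOrd c) 0 + 1)
        else d) (d.insert i 0)) PySem.Dict.empty with hd
  have hitems : d.items = (PySem.List.pyRange 97 123 1).map (fun i => (i, pvCnt s.toList i)) := by
    rw [hd]; exact pv_dict_items s.toList
  have hkeys : d.keys = PySem.List.pyRange 97 123 1 := by
    simp only [PySem.Dict.keys]
    rw [hitems, List.map_map]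
    show List.map (fun i => i) _ = _
    simp
  have hknd : d.keys.Nodup := by rw [hkeys]; exact PySem.List.nodup_pyRange_one 97 123
  have hvals : d.values = pvVals s.toList := by
    simp only [PySem.Dict.values, hitems, List.map_map, pvVals]
    rfl
  have hbubA : pvBubbleA d.keys = d.keys := by rw [hkeys]; exact pv_bubbleA_range
  have hsorted : (pvBubbleA d.keys).map (fun i => d.getD i 0) = pvVals s.toList := by
    rw [hbubA, hkeys, pvVals]
    refine List.map_congr_left ?_
    intro i hi
    have hmem : (i, pvCnt s.toList i) ∈ d.items := by
      rw [hitems]; exact List.mem_map_of_mem hi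
    exact PySem.Dict.getD_of_mem_items d hmem hknd 0
  rw [hvals, hsorted, pv_bubbleD_eq]
  have hlen : (pvVals s.toList).length = 26 := by
    simp [pvVals, PySem.List.length_pyRange_one]
  rw [hlen]
  cases hbe : (pvVals s.toList == pvIter 26 (pvVals s.toList)) <;> simp

-- B computes: the non-increasing scan of the same counts list
theorem pv_B_eq (s : String) : BeautifulString_alt s = pvNonInc (pvVals s.toList) := by
  unfold BeautifulString_alt
  dsimp only
  obtain ⟨h1, h2⟩ := pv_freq s.toList (List.replicate 26 (0 : Int)) (by simp)
  congr 1
  have hlenv : (pvVals s.toList).length = 26 := by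
    simp [pvVals, PySem.List.length_pyRange_one]
  apply List.ext_getElem (by rw [h1, hlenv])
  intro k hk1 hk2
  have hk : k < 26 := by rwa [h1] at hk1
  rw [← List.getD_eq_getElem _ 0 hk1, ← List.getD_eq_getElem _ 0 hk2]
  rw [h2 k hk]
  rw [List.getD_replicate _ hk]
  have hv : (pvVals s.toList).getD k 0 = pvCnt s.toList ((97 : Int) + k) := by
    rw [pvVals, PySem.List.pyRange_one, List.map_map]
    rw [List.getD_eq_getElem _ _ (by simpa using hk)]
    simp
  rw [hv]
  exact zero_add _

-- ===== VERDICT (by name: the statement is the Claim_ definition above) =====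
theorem BeautifulString_spec : Claim_equal_BeautifulString := by
  intro s _
  show BeautifulString s = BeautifulString_alt s
  rw [pv_A_eq, pv_B_eq]
  by_cases hC : (pvVals s.toList).IsChain (fun a b => b ≤ a)
  · have h1 : pvNonInc (pvVals s.toList) = true := (pv_nonInc_iff _).mpr hC
    have h2 : pvVals s.toList = pvIter (pvVals s.toList).length (pvVals s.toList) :=
      (pv_fix_iff _).mpr hC
    rw [h1, ← h2]
    simp
  · have h1 : pvNonInc (pvVals s.toList) = false := by
      rw [← Bool.not_eq_true, pv_nonInc_iff]; exact hC
    have h2 : (pvVals s.toList == pvIter (pvVals s.toList).length (pvVals s.toList)) = false := by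
      rw [beq_eq_false_iff_ne]
      intro he
      exact hC ((pv_fix_iff _).mp he)
    rw [h1, h2]
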